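-- pv_equiv track=rewrite | github.com/ffffibo/tdw-creditroll | rescan_credits.py | split_names
-- ===== SOURCE A (Python) =====
-- def split_names(text):
--     parts = []
--     for line in text.split('\n'):
--         line = line.strip()
--         if not line:
--             continue
--         for name in line.split(','):
--             name = name.strip()
--             if name:
--                 parts.append(name)
--     return parts
-- ===== SOURCE B (Python) =====
-- def split_names(text):
--     # One flat pass: fold newlines into commas, split once, strip and drop empties.
--     return [name for name in
--             (token.strip() for token in text.replace('\n', ',').split(','))
--             if name]
-- ===== Notes on version B (the rewrite author's own statement) =====
-- stated objective: idiomatic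
-- what changed: Replaces A's nested per-line-then-per-comma loops with a single flat pass: newlines are folded into commas by replace, the text is split once, and a comprehension strips each token and drops empties.
import Mathlib
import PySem

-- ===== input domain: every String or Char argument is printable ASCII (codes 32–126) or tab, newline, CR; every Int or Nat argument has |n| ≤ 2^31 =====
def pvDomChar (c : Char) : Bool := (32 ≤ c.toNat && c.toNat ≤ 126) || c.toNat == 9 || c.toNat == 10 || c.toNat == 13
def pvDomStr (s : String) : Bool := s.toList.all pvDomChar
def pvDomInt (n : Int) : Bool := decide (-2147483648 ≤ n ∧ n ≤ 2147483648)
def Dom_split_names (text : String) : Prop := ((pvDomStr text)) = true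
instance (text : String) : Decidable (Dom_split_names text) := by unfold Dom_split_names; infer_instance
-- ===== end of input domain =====

-- B replaces A's nested line/comma loops with one flat pass: newlines folded into commas by replace, a single split, strip+filter; same return value (idiomatic restructuring).


-- ===== PORT A =====
-- Strings are handled via PySem.Chars on `toList` (PySem's string model); the collected
-- names are turned back into `String` with `String.ofList` at the return boundary.
def split_names (text : String) : List String :=
  (((PySem.Chars.split? text.toList ['\n']).getD []).foldl
    (fun parts line =>
      let line := PySem.Chars.strip line
      if line = [] then parts
      else ((PySem.Chars.split? line [',']).getD []).foldl
        (fun parts name =>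
          let name := PySem.Chars.strip name
          if name = [] then parts else parts ++ [name]) parts)
    []).map String.ofList

-- ===== PORT B =====
def split_names_alt (text : String) : List String :=
  ((((PySem.Chars.split? (PySem.Chars.replace text.toList ['\n'] [',']) [',']).getD []).map
      PySem.Chars.strip).filter (fun n => n ≠ [])).map String.ofList

-- ===== PRECONDITION & SPEC =====
def Spec_split_names (text : String) (out : List String) : Prop := out = split_names_alt text
instance (text : String) (out : List String) : Decidable (Spec_split_names text out) := by unfold Spec_split_names; infer_instance

-- ===== CLAIM (what is proved, stated in full; the proofs are below) =====
def Claim_equal_split_names : Prop := ∀ (text : String), Dom_split_names text → Spec_split_names text (split_names text)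

-- ===== LEMMAS AND PROOFS =====

def splitCh (d : Char) : List Char → List Char × List (List Char)
  | [] => ([], [])
  | c :: t =>
    let p := splitCh d t
    if c = d then ([], p.1 :: p.2) else (c :: p.1, p.2)

def modLast (f : List Char → List Char) : List (List Char) → List (List Char)
  | [] => []
  | [x] => [f x]
  | x :: y :: xs => x :: modLast f (y :: xs)

lemma lstrip_idem (l : List Char) : PySem.Chars.lstrip (PySem.Chars.lstrip l) = PySem.Chars.lstrip l := by
  simp only [PySem.Chars.lstrip]
  exact List.dropWhile_idempotent PySem.Chars.isspace l

lemma rstrip_cons (c : Char) (t : List Char) :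
    PySem.Chars.rstrip (c :: t)
      = if PySem.Chars.rstrip t = [] then PySem.Chars.rstrip [c] else c :: PySem.Chars.rstrip t := by
  simp only [PySem.Chars.rstrip, List.reverse_cons, List.dropWhile_append]
  by_cases h : (List.dropWhile PySem.Chars.isspace t.reverse) = []
  · simp [h]
  · simp [h, List.isEmpty_eq_false_iff.mpr h]

lemma rstrip_eq_nil_iff (t : List Char) :
    PySem.Chars.rstrip t = [] ↔ t.all PySem.Chars.isspace := by
  rw [PySem.Chars.rstrip, List.reverse_eq_nil_iff, List.dropWhile_eq_nil_iff, List.all_eq_true]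
  constructor
  · intro h x hx; exact h x (by simpa using hx)
  · intro h x hx; exact h x (by simpa using hx)

lemma rstrip_idem (l : List Char) : PySem.Chars.rstrip (PySem.Chars.rstrip l) = PySem.Chars.rstrip l := by
  simp only [PySem.Chars.rstrip, List.reverse_reverse]
  rw [List.dropWhile_idempotent]

lemma lstrip_rstrip_comm (l : List Char) :
    PySem.Chars.lstrip (PySem.Chars.rstrip l) = PySem.Chars.rstrip (PySem.Chars.lstrip l) := by
  induction l with
  | nil => rfl
  | cons c t ih =>
    by_cases hs : PySem.Chars.isspace c = true
    · by_cases hn : PySem.Chars.rstrip t = []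
      · rw [rstrip_cons, if_pos hn]
        have ht : t.all PySem.Chars.isspace := (rstrip_eq_nil_iff t).mp hn
        have hlt : PySem.Chars.lstrip t = [] := by
          rw [PySem.Chars.lstrip, List.dropWhile_eq_nil_iff]
          intro x hx
          exact (List.all_eq_true.mp ht x hx)
        have h1 : PySem.Chars.lstrip (c :: t) = PySem.Chars.lstrip t := by
          simp [PySem.Chars.lstrip, hs]
        have h2 : PySem.Chars.rstrip [c] = ([] : List Char) := by
          simp [PySem.Chars.rstrip, hs]
        rw [h2, h1, hlt]
        rfl
      · rw [rstrip_cons, if_neg hn]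
        have : PySem.Chars.lstrip (c :: PySem.Chars.rstrip t) = PySem.Chars.lstrip (PySem.Chars.rstrip t) := by
          simp [PySem.Chars.lstrip, hs]
        rw [this, ih]
        have : PySem.Chars.lstrip (c :: t) = PySem.Chars.lstrip t := by
          simp [PySem.Chars.lstrip, hs]
        rw [this]
    · have hl : PySem.Chars.lstrip (c :: t) = c :: t := by
        simp [PySem.Chars.lstrip, hs]
      rw [hl]
      by_cases hn : PySem.Chars.rstrip t = []
      · rw [rstrip_cons, if_pos hn]
        have : PySem.Chars.rstrip [c] = [c] := by
          simp [PySem.Chars.rstrip, hs]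
        rw [this]
        simp [PySem.Chars.lstrip, hs]
      · rw [rstrip_cons, if_neg hn]
        have : PySem.Chars.lstrip (c :: PySem.Chars.rstrip t) = c :: PySem.Chars.rstrip t := by
          simp [PySem.Chars.lstrip, hs]
        rw [this]

lemma strip_lstrip (l : List Char) : PySem.Chars.strip (PySem.Chars.lstrip l) = PySem.Chars.strip l := by
  simp [PySem.Chars.strip, lstrip_idem]

lemma strip_rstrip (l : List Char) : PySem.Chars.strip (PySem.Chars.rstrip l) = PySem.Chars.strip l := by
  simp [PySem.Chars.strip, lstrip_rstrip_comm, rstrip_idem]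

lemma comma_not_space : PySem.Chars.isspace ',' = false := by decide

lemma allspace_splitCh (t : List Char) (h : t.all PySem.Chars.isspace = true) :
    splitCh ',' t = (t, []) := by
  induction t with
  | nil => rfl
  | cons c r ih =>
    simp only [List.all_cons, Bool.and_eq_true] at h
    have hc : ¬ (c = ',') := by
      intro hc; rw [hc] at h; simp [comma_not_space] at h
    simp [splitCh, hc, ih h.2]

lemma splitCh_snd_nil (d : Char) (t : List Char) (h : (splitCh d t).2 = []) :
    (splitCh d t).1 = t := by
  induction t with
  | nil => rfl
  | cons c r ih =>
    by_cases hc : c = d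
    · simp [splitCh, hc] at h
    · simp only [splitCh, if_neg hc] at h ⊢
      simp [ih h]

lemma lstrip_splitCh (l : List Char) :
    splitCh ',' (PySem.Chars.lstrip l)
      = (PySem.Chars.lstrip (splitCh ',' l).1, (splitCh ',' l).2) := by
  induction l with
  | nil => rfl
  | cons c t ih =>
    by_cases hs : PySem.Chars.isspace c = true
    · have hc : ¬ (c = ',') := by
        intro hc; rw [hc] at hs; simp [comma_not_space] at hs
      have h1 : PySem.Chars.lstrip (c :: t) = PySem.Chars.lstrip t := by
        simp [PySem.Chars.lstrip, hs]
      rw [h1, ih]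
      simp only [splitCh, if_neg hc]
      have : PySem.Chars.lstrip (c :: (splitCh ',' t).1) = PySem.Chars.lstrip (splitCh ',' t).1 := by
        simp [PySem.Chars.lstrip, hs]
      rw [this]
    · have h1 : PySem.Chars.lstrip (c :: t) = c :: t := by
        simp [PySem.Chars.lstrip, hs]
      rw [h1]
      by_cases hc : c = ','
      · simp [splitCh, hc, PySem.Chars.lstrip]
      · simp only [splitCh, if_neg hc]
        have : PySem.Chars.lstrip (c :: (splitCh ',' t).1) = c :: (splitCh ',' t).1 := by
          simp [PySem.Chars.lstrip, hs]
        rw [this]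

lemma rstrip_splitCh (l : List Char) :
    splitCh ',' (PySem.Chars.rstrip l)
      = (if (splitCh ',' l).2 = [] then (PySem.Chars.rstrip (splitCh ',' l).1, [])
         else ((splitCh ',' l).1, modLast PySem.Chars.rstrip (splitCh ',' l).2)) := by
  induction l with
  | nil => rfl
  | cons c t ih =>
    rw [rstrip_cons]
    by_cases hn : PySem.Chars.rstrip t = []
    · rw [if_pos hn]
      have ht : t.all PySem.Chars.isspace := (rstrip_eq_nil_iff t).mp hn
      have hsp : splitCh ',' t = (t, []) := allspace_splitCh t ht
      by_cases hs : PySem.Chars.isspace c = true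
      · have hc : ¬ (c = ',') := by
          intro hc; rw [hc] at hs; simp [comma_not_space] at hs
        have h2 : PySem.Chars.rstrip [c] = ([] : List Char) := by
          simp [PySem.Chars.rstrip, hs]
        rw [h2]
        simp only [splitCh, if_neg hc, hsp, if_true, eq_self_iff_true]
        have : PySem.Chars.rstrip (c :: t) = [] := by
          rw [rstrip_cons, if_pos hn, h2]
        simp [this]
      · have h2 : PySem.Chars.rstrip [c] = [c] := by
          simp [PySem.Chars.rstrip, hs]
        rw [h2]
        by_cases hc : c = ','
        · subst hc
          simp only [splitCh, if_pos rfl, hsp]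
          simp [modLast, hn]
        · simp only [splitCh, if_neg hc, hsp, if_true, eq_self_iff_true]
          have : PySem.Chars.rstrip (c :: t) = [c] := by
            rw [rstrip_cons, if_pos hn, h2]
          simp [this]
    · rw [if_neg hn]
      by_cases hc : c = ','
      · subst hc
        simp only [splitCh, if_pos rfl]
        rw [ih]
        by_cases hr : (splitCh ',' t).2 = []
        · rw [if_pos hr]
          simp only [if_neg (by simp : ¬ ((splitCh ',' t).1 :: (splitCh ',' t).2 = ([] : List (List Char))))]
          rw [hr]
          have h1 : (splitCh ',' t).1 = t := splitCh_snd_nil ',' t hr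
          simp [modLast, h1]
        · rw [if_neg hr]
          simp only [if_neg (by simp : ¬ ((splitCh ',' t).1 :: (splitCh ',' t).2 = ([] : List (List Char))))]
          cases h2 : (splitCh ',' t).2 with
          | nil => exact absurd h2 hr
          | cons y ys => simp [modLast, h2]
      · simp only [splitCh, if_neg hc]
        rw [ih]
        by_cases hr : (splitCh ',' t).2 = []
        · rw [if_pos hr]
          simp only [if_pos hr, hr]
          have h1 : (splitCh ',' t).1 = t := splitCh_snd_nil ',' t hr
          rw [h1, rstrip_cons, if_neg hn]
          simp
        · rw [if_neg hr]
          simp [if_neg hr]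

def splitChL (d : Char) (l : List Char) : List (List Char) :=
  (splitCh d l).1 :: (splitCh d l).2

lemma mapstrip_modLast (r : List (List Char)) :
    (modLast PySem.Chars.rstrip r).map PySem.Chars.strip = r.map PySem.Chars.strip := by
  induction r with
  | nil => rfl
  | cons x xs ih =>
    cases xs with
    | nil => simp [modLast, strip_rstrip]
    | cons y ys => simp only [modLast, List.map_cons] at ih ⊢; rw [ih]

lemma mapstrip_strip (l : List Char) :
    (splitChL ',' (PySem.Chars.strip l)).map PySem.Chars.strip
      = (splitChL ',' l).map PySem.Chars.strip := by
  have hstrip : PySem.Chars.strip l = PySem.Chars.rstrip (PySem.Chars.lstrip l) := rfl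
  rw [splitChL, hstrip, rstrip_splitCh (PySem.Chars.lstrip l), lstrip_splitCh l]
  by_cases hr : (splitCh ',' l).2 = []
  · have hcond : ((PySem.Chars.lstrip (splitCh ',' l).1, (splitCh ',' l).2)).2 = ([] : List (List Char)) := hr
    rw [if_pos hcond]
    have h1 : PySem.Chars.strip (PySem.Chars.rstrip (PySem.Chars.lstrip (splitCh ',' l).1))
        = PySem.Chars.strip (splitCh ',' l).1 := by
      rw [strip_rstrip, strip_lstrip]
    simp [splitChL, hr, h1]
  · have hcond : ¬ (((PySem.Chars.lstrip (splitCh ',' l).1, (splitCh ',' l).2)).2 = ([] : List (List Char))) := hr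
    rw [if_neg hcond]
    simp only [splitChL, List.map_cons, mapstrip_modLast]
    rw [show PySem.Chars.strip (PySem.Chars.lstrip (splitCh ',' l).1) = PySem.Chars.strip (splitCh ',' l).1 from strip_lstrip _]

lemma flat_split (cs : List Char) :
    splitChL ',' (cs.map (fun c => if c = '\n' then ',' else c))
      = (splitChL '\n' cs).flatMap (fun line => splitChL ',' line) := by
  induction cs with
  | nil => simp [splitChL, splitCh]
  | cons c cs ih =>
    by_cases h1 : c = '\n'
    · subst h1
      simp only [List.map_cons, if_pos rfl, if_true]
      have hL : splitChL ',' (',' :: cs.map (fun c => if c = '\n' then ',' else c))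
          = [] :: splitChL ',' (cs.map (fun c => if c = '\n' then ',' else c)) := by
        simp [splitChL, splitCh]
      have hR : splitChL '\n' ('\n' :: cs) = [] :: splitChL '\n' cs := by
        simp [splitChL, splitCh]
      rw [hL, hR, ih]
      simp [splitChL, splitCh]
    · by_cases h2 : c = ','
      · subst h2
        simp only [List.map_cons, if_neg h1]
        have hL : splitChL ',' (',' :: cs.map (fun c => if c = '\n' then ',' else c))
            = [] :: splitChL ',' (cs.map (fun c => if c = '\n' then ',' else c)) := by
          simp [splitChL, splitCh]
        have hR : splitChL '\n' (',' :: cs) = (',' :: (splitCh '\n' cs).1) :: (splitCh '\n' cs).2 := by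
          simp [splitChL, splitCh, h1]
        rw [hL, hR, ih]
        have : splitChL ',' (',' :: (splitCh '\n' cs).1) = [] :: splitChL ',' (splitCh '\n' cs).1 := by
          simp [splitChL, splitCh]
        simp only [List.flatMap_cons, this, List.cons_append, List.cons.injEq]
        refine ⟨by simp [splitCh], ?_⟩
        simpa only [splitChL, List.flatMap_cons, List.cons_append] using ih
      · simp only [List.map_cons, if_neg h1]
        have hL : splitChL ',' (c :: cs.map (fun c => if c = '\n' then ',' else c))
            = (c :: (splitCh ',' (cs.map (fun c => if c = '\n' then ',' else c))).1)
              :: (splitCh ',' (cs.map (fun c => if c = '\n' then ',' else c))).2 := by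
          simp [splitChL, splitCh, h2]
        have hR : splitChL '\n' (c :: cs) = (c :: (splitCh '\n' cs).1) :: (splitCh '\n' cs).2 := by
          simp [splitChL, splitCh, h1]
        rw [hL, hR]
        have hih : (splitCh ',' (cs.map (fun c => if c = '\n' then ',' else c))).1
              :: (splitCh ',' (cs.map (fun c => if c = '\n' then ',' else c))).2
            = (splitCh ',' (splitCh '\n' cs).1).1
              :: ((splitCh ',' (splitCh '\n' cs).1).2
                  ++ (splitCh '\n' cs).2.flatMap (fun line => splitChL ',' line)) := by
          have := ih
          simp only [splitChL, List.flatMap_cons, List.cons_append] at this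
          exact this
        have h3 : splitChL ',' (c :: (splitCh '\n' cs).1)
            = (c :: (splitCh ',' (splitCh '\n' cs).1).1) :: (splitCh ',' (splitCh '\n' cs).1).2 := by
          simp [splitChL, splitCh, h2]
        simp only [List.flatMap_cons, h3, List.cons_append]
        rw [List.cons.injEq] at hih
        rw [hih.1, hih.2]

theorem splitOn_go_single (d : Char) :
    ∀ (fuel : Nat) (l cur : List Char) (acc : List (List Char)), l.length < fuel →
    PySem.Chars.splitOn.go [d] fuel l cur acc
      = acc.reverse ++ (cur.reverse ++ (splitCh d l).1) :: (splitCh d l).2 := by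
  intro fuel
  induction fuel with
  | zero => intro l cur acc h; omega
  | succ n ih =>
    intro l cur acc h
    cases l with
    | nil => simp [PySem.Chars.splitOn.go, splitCh]
    | cons c rest =>
      rw [PySem.Chars.splitOn.go]
      by_cases hc : c = d
      · subst hc
        simp only [List.isPrefixOf, splitCh]
        simp [ih rest [] ((cur.reverse) :: acc) (by simpa using Nat.lt_of_succ_lt_succ h)]
      · simp only [List.isPrefixOf, splitCh]
        have : (d == c) = false := by simp [BEq.comm]; exact fun hh => hc hh.symm
        simp only [this, Bool.false_and, if_neg Bool.false_ne_true]
        rw [ih rest (c :: cur) acc (by simpa using Nat.lt_of_succ_lt_succ h)]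
        simp [hc]

theorem splitOn_single (d : Char) (l : List Char) :
    PySem.Chars.splitOn l [d] = (splitCh d l).1 :: (splitCh d l).2 := by
  unfold PySem.Chars.splitOn
  rw [splitOn_go_single d (l.length + 1) l [] [] (by omega)]
  simp


theorem replace_go_single (a b : Char) :
    ∀ (fuel : Nat) (l acc : List Char), l.length ≤ fuel →
    PySem.Chars.replace.go [a] [b] fuel l acc
      = acc.reverse ++ l.map (fun c => if c = a then b else c) := by
  intro fuel
  induction fuel with
  | zero => intro l acc h
            rw [List.length_eq_zero_iff.mp (Nat.le_zero.mp h)]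
            simp [PySem.Chars.replace.go]
  | succ n ih =>
    intro l acc h
    cases l with
    | nil => simp [PySem.Chars.replace.go]
    | cons c rest =>
      rw [PySem.Chars.replace.go]
      by_cases hc : c = a
      · subst hc
        simp only [List.isPrefixOf]
        simp only [beq_self_eq_true, Bool.true_and, if_pos rfl, List.length_cons,
          List.length_nil, Nat.zero_add, List.drop_one, List.tail_cons, List.drop_succ_cons, List.drop_zero]
        rw [ih rest ([b].reverse ++ acc) (by simpa using Nat.le_of_succ_le_succ h)]
        simp
      · simp only [List.isPrefixOf]
        have : (a == c) = false := by simp; exact fun hh => hc hh.symm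
        simp only [this, Bool.false_and, if_neg Bool.false_ne_true]
        rw [ih rest (c :: acc) (by simpa using Nat.le_of_succ_le_succ h)]
        simp [hc]

theorem replace_single (a b : Char) (l : List Char) :
    PySem.Chars.replace l [a] [b] = l.map (fun c => if c = a then b else c) := by
  unfold PySem.Chars.replace
  simp [replace_go_single a b l.length l [] (le_refl _)]



-- parts contributed by one line: split on ',', strip each piece, drop empties
def partsOf (l : List Char) : List (List Char) :=
  ((splitChL ',' l).map PySem.Chars.strip).filter (fun n => n ≠ [])

lemma strip_eq_nil_all (l : List Char) (h : PySem.Chars.strip l = []) :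
    l.all PySem.Chars.isspace = true := by
  have h1 : (PySem.Chars.lstrip l).all PySem.Chars.isspace = true := (rstrip_eq_nil_iff _).mp h
  rw [List.all_eq_true]
  intro x hx
  rw [← List.takeWhile_append_dropWhile (p := PySem.Chars.isspace) (l := l), List.mem_append] at hx
  cases hx with
  | inl hx => exact List.mem_takeWhile_imp hx
  | inr hx => exact List.all_eq_true.mp h1 x hx

lemma partsOf_of_strip_nil (l : List Char) (h : PySem.Chars.strip l = []) : partsOf l = [] := by
  have hall := strip_eq_nil_all l h
  unfold partsOf splitChL
  rw [allspace_splitCh l hall]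
  have : PySem.Chars.strip l = [] := h
  simp [this]

lemma partsOf_strip (l : List Char) : partsOf (PySem.Chars.strip l) = partsOf l := by
  unfold partsOf
  rw [mapstrip_strip]

lemma inner_eq (line : List Char) (parts : List (List Char)) :
    ((PySem.Chars.split? line [',']).getD []).foldl
      (fun parts name =>
        let name := PySem.Chars.strip name
        if name = [] then parts else parts ++ [name]) parts
    = parts ++ partsOf line := by
  rw [PySem.Chars.split?.eq_1]
  simp only [List.isEmpty_cons, Bool.false_eq_true, if_false, Option.getD_some]
  rw [splitOn_single]
  rw [show (splitCh ',' line).1 :: (splitCh ',' line).2 = splitChL ',' line from rfl]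
  unfold partsOf
  generalize splitChL ',' line = ps
  induction ps generalizing parts with
  | nil => simp
  | cons p ps ih =>
    simp only [List.foldl_cons, List.map_cons, List.filter_cons]
    by_cases h : PySem.Chars.strip p = []
    · simp [h, ih]
    · simp [h, ih, List.append_assoc]

lemma outer_eq (lines : List (List Char)) (acc : List (List Char)) :
    lines.foldl
      (fun parts line =>
        let line := PySem.Chars.strip line
        if line = [] then parts
        else ((PySem.Chars.split? line [',']).getD []).foldl
          (fun parts name =>
            let name := PySem.Chars.strip name
            if name = [] then parts else parts ++ [name]) parts) acc
    = acc ++ lines.flatMap partsOf := by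
  have hfun : (fun (parts : List (List Char)) (line : List Char) =>
        let line := PySem.Chars.strip line
        if line = [] then parts
        else ((PySem.Chars.split? line [',']).getD []).foldl
          (fun parts name =>
            let name := PySem.Chars.strip name
            if name = [] then parts else parts ++ [name]) parts)
      = (fun parts line => if PySem.Chars.strip line = [] then parts else parts ++ partsOf line) := by
    funext parts line
    by_cases h : PySem.Chars.strip line = []
    · simp [h]
    · simp only [if_neg h, inner_eq, partsOf_strip]
  rw [hfun]
  induction lines generalizing acc with
  | nil => simp
  | cons l ls ih =>
    simp only [List.foldl_cons, List.flatMap_cons]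
    by_cases h : PySem.Chars.strip l = []
    · rw [if_pos h, ih, partsOf_of_strip_nil l h]
      simp
    · rw [if_neg h, ih, List.append_assoc]

-- ===== VERDICT (by name: the statement is the Claim_ definition above) =====
theorem split_names_spec : Claim_equal_split_names := by
  intro text _
  unfold Spec_split_names split_names split_names_alt
  rw [outer_eq]
  rw [PySem.Chars.split?.eq_1, PySem.Chars.split?.eq_1]
  simp only [List.isEmpty_cons, Bool.false_eq_true, if_false, Option.getD_some]
  rw [splitOn_single, splitOn_single, replace_single]
  rw [show (splitCh ',' (text.toList.map (fun c => if c = '\n' then ',' else c))).1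
        :: (splitCh ',' (text.toList.map (fun c => if c = '\n' then ',' else c))).2
      = splitChL ',' (text.toList.map (fun c => if c = '\n' then ',' else c)) from rfl]
  rw [show (splitCh '\n' text.toList).1 :: (splitCh '\n' text.toList).2
      = splitChL '\n' text.toList from rfl]
  rw [flat_split, List.map_flatMap, List.filter_flatMap]
  simp only [List.nil_append]
  rfl
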